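-- pv_equiv track=rewrite | github.com/Soojin-Lee-01/Algorithm-Study | Python/Programmers/체육대회/체육대회.py | solution
-- ===== SOURCE A (Python) =====
-- from itertools import permutations
--
-- def solution(ability):
--     num_people = len(ability)
--     num_tasks = len(ability[0])
--     max_score = 0
--
--     for perm in permutations(range(num_people), num_tasks):
--         temp_score = 0
--         for task in range(num_tasks):
--             temp_score += ability[perm[task]][task]
--         max_score = max(max_score, temp_score)
--
--     return max_score
-- ===== SOURCE B (Python) =====
-- from functools import lru_cache
--
-- def solution(ability):
--     num_people = len(ability)
--     num_tasks = len(ability[0])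
--     if num_people < num_tasks:
--         return 0
--
--     @lru_cache(maxsize=None)
--     def best(t, used):
--         if t == num_tasks:
--             return 0
--         return max(ability[p][t] + best(t + 1, used | 1 << p)
--                    for p in range(num_people) if not used >> p & 1)
--
--     return max(0, best(0, 0))
-- ===== Notes on version B (the rewrite author's own statement) =====
-- stated objective: faster
-- what changed: Replaces A's exhaustive enumeration of all T-permutations of people with a memoized bitmask dynamic program over (task index, set of used people), keeping the same max(0, best complete assignment) result.
import Mathlib
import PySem

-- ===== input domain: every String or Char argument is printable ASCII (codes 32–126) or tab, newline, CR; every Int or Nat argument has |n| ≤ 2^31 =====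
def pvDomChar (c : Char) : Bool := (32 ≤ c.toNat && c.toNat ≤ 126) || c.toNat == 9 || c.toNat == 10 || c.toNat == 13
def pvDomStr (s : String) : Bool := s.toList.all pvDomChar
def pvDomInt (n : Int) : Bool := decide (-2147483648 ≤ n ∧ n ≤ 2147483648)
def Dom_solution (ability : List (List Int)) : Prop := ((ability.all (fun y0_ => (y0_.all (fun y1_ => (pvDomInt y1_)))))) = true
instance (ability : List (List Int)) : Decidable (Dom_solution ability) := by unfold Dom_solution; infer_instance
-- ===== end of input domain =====

-- B replaces A's enumeration of all T-permutations of people by a memoized bitmask DP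
-- over (task index, used-people set); return values proved equal on Pre_solution.

-- ===== PORT A =====
-- for perm in permutations(range(num_people), num_tasks): temp = Σ_task ability[perm[task]][task]; max_score = max(max_score, temp)
def solution (ability : List (List Int)) : Int :=
  let numPeople : Nat := ability.length
  let numTasks : Nat := (PySem.List.pyGetD ability 0 []).length
  (PySem.List.permutations (PySem.List.pyRange 0 (numPeople : Int) 1) numTasks).foldl
    (fun maxScore perm =>
      max maxScore
        ((PySem.List.pyRange 0 (numTasks : Int) 1).foldl
          (fun temp task =>
            temp + PySem.List.pyGetD (PySem.List.pyGetD ability (PySem.List.pyGetD perm task 0) []) task 0)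
          0))
    0

-- ===== PORT B =====
-- best(t, used) of Source B (the lru_cache is a pure memoization and does not change the value).
-- Python tests `t == num_tasks`; calls start at t = 0 and increment only while t < num_tasks,
-- so `num_tasks ≤ t` is the same test and makes termination evident.
-- `max(...)` over an empty generator is Python's ValueError; it is unreachable from solution_alt
-- (the guard gives num_tasks ≤ num_people, so a free person always exists); `.getD 0` is that dead branch.
def bestGo (ability : List (List Int)) (numPeople numTasks : Nat) (t : Nat) (used : Nat) : Int :=
  if numTasks ≤ t then 0
  else
    ((((PySem.List.pyRange 0 (numPeople : Int) 1).filter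
          (fun p => (used >>> p.toNat) &&& 1 == 0)).map
        (fun p =>
          PySem.List.pyGetD (PySem.List.pyGetD ability p []) (t : Int) 0
            + bestGo ability numPeople numTasks (t + 1) (used ||| (1 <<< p.toNat)))).max?).getD 0
termination_by numTasks - t

def solution_alt (ability : List (List Int)) : Int :=
  let numPeople : Nat := ability.length
  let numTasks : Nat := (PySem.List.pyGetD ability 0 []).length
  if numPeople < numTasks then 0
  else max 0 (bestGo ability numPeople numTasks 0 0)

-- ===== PRECONDITION & SPEC =====
-- Exactly the inputs where A returns: ability must be nonempty (A reads ability[0]); and whenever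
-- num_tasks ≤ num_people (so the permutation loop runs and indexes every row at every task),
-- every row must have at least num_tasks entries, else A raises IndexError.
def Pre_solution (ability : List (List Int)) : Prop :=
  ability ≠ [] ∧
  ((PySem.List.pyGetD ability 0 []).length ≤ ability.length →
    ∀ row ∈ ability, (PySem.List.pyGetD ability 0 []).length ≤ row.length)
instance (ability : List (List Int)) : Decidable (Pre_solution ability) := by
  unfold Pre_solution; infer_instance

def pvWitness_solution : List (List Int) := [[1, 2], [3, 4], [5, 6]]

def Spec_solution (ability : List (List Int)) (out : Int) : Prop := out = solution_alt ability
instance (ability : List (List Int)) (out : Int) : Decidable (Spec_solution ability out) := by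
  unfold Spec_solution; infer_instance

-- ===== CLAIM (what is proved, stated in full; the proofs are below) =====
def Claim_equal_solution : Prop := ∀ (ability : List (List Int)), Dom_solution ability → Pre_solution ability → Spec_solution ability (solution ability)

-- ===== LEMMAS AND PROOFS =====

-- ability[p][t], as both ports read it
def pvAt (ability : List (List Int)) (p : Int) (t : Nat) : Int :=
  PySem.List.pyGetD (PySem.List.pyGetD ability p []) (t : Int) 0

-- score of the suffix of a permutation whose first person works task t
def pvSc (ability : List (List Int)) : Nat → List Int → Int
  | _, [] => 0
  | t, p :: ps => pvAt ability p t + pvSc ability (t + 1) ps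

-- max of a list of optional scores (none = no assignment exists)
def pvOmax : Option Int → Option Int → Option Int
  | none, b => b
  | a, none => a
  | some x, some y => some (max x y)

def pvOlmax (l : List (Option Int)) : Option Int := l.foldl pvOmax none

-- best total score assigning tasks t, t+1, … (r of them) to r distinct people from xs
def pvG (ability : List (List Int)) : Nat → List Int → Nat → Option Int
  | _, _, 0 => some 0
  | t, xs, r + 1 =>
      pvOlmax ((List.range xs.length).map (fun i =>
        (pvG ability (t + 1) (xs.eraseIdx i) r).map (fun v => pvAt ability (xs.getD i 0) t + v)))

theorem pvOmax_none_right (a : Option Int) : pvOmax a none = a := by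
  cases a <;> rfl

theorem pvFoldl_omax (l : List (Option Int)) (a : Option Int) :
    l.foldl pvOmax a = pvOmax a (pvOlmax l) := by
  induction l generalizing a with
  | nil => simp [pvOlmax, List.foldl, pvOmax_none_right]
  | cons o l ih =>
      show (o :: l).foldl pvOmax a = pvOmax a (pvOlmax (o :: l))
      rw [List.foldl_cons, ih]
      show pvOmax (pvOmax a o) (pvOlmax l) = pvOmax a ((o :: l).foldl pvOmax none)
      rw [List.foldl_cons, ih (pvOmax none o)]
      cases a <;> cases o <;> cases pvOlmax l <;> simp [pvOmax, max_assoc]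

theorem pvOlmax_cons (o : Option Int) (l : List (Option Int)) :
    pvOlmax (o :: l) = pvOmax o (pvOlmax l) := by
  show (o :: l).foldl pvOmax none = _
  rw [List.foldl_cons, pvFoldl_omax]
  cases o <;> rfl

-- every member of permutations xs r has length r
theorem pvLen_mem_permutations {α : Type} (r : Nat) (xs q : List α)
    (h : q ∈ PySem.List.permutations xs r) : q.length = r := by
  induction r generalizing xs q with
  | zero =>
      rw [PySem.List.permutations] at h
      simp at h; simp [h]
  | succ r ih =>
      rw [PySem.List.permutations] at h
      simp only [List.mem_flatMap, List.mem_range] at h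
      obtain ⟨i, hi, hq⟩ := h
      rcases hx : xs[i]? with _ | x
      · rw [hx] at hq; simp at hq
      · rw [hx] at hq
        simp only [List.mem_map] at hq
        obtain ⟨p, hp, rfl⟩ := hq
        simp [ih _ _ hp]

-- permutations xs (r+1), with the in-range index lookup resolved
theorem pvPerms_succ (xs : List Int) (r : Nat) :
    PySem.List.permutations xs (r + 1) =
      (List.range xs.length).flatMap (fun i =>
        (PySem.List.permutations (xs.eraseIdx i) r).map (fun p => xs.getD i 0 :: p)) := by
  rw [PySem.List.permutations]
  apply List.flatMap_congr
  intro i hi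
  rw [List.getElem?_eq_getElem (List.mem_range.mp hi),
    List.getD_eq_getElem xs 0 (List.mem_range.mp hi)]

-- A-side: folding max over all r-permutations computes pvG
theorem pvFold_perms (ability : List (List Int)) (r : Nat) (xs : List Int) (t : Nat) (c m : Int) :
    (PySem.List.permutations xs r).foldl (fun ms q => max ms (c + pvSc ability t q)) m =
      match pvG ability t xs r with
      | none => m
      | some v => max m (c + v) := by
  induction r generalizing xs t c m with
  | zero =>
      rw [PySem.List.permutations]
      simp [pvG, pvSc]
  | succ r ih =>
      rw [pvPerms_succ, pvG]
      have aux : ∀ (l : List Nat), (∀ i ∈ l, i < xs.length) → ∀ (m : Int),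
          (List.flatMap (fun i =>
              (PySem.List.permutations (xs.eraseIdx i) r).map (fun p => xs.getD i 0 :: p)) l).foldl
            (fun ms q => max ms (c + pvSc ability t q)) m =
          match pvOlmax (l.map (fun i =>
              (pvG ability (t + 1) (xs.eraseIdx i) r).map (fun v => pvAt ability (xs.getD i 0) t + v))) with
          | none => m
          | some v => max m (c + v) := by
        intro l
        induction l with
        | nil => intro _ m; rfl
        | cons i l ihl =>
            intro hl m
            have hi : i < xs.length := hl i (by simp)
            rw [List.flatMap_cons, List.foldl_append, List.map_cons, pvOlmax_cons]
            have hfun : (fun (ms : Int) (q : List Int) => max ms (c + pvSc ability t (xs.getD i 0 :: q))) =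
                (fun ms q => max ms ((c + pvAt ability (xs.getD i 0) t) + pvSc ability (t + 1) q)) := by
              funext ms q; rw [pvSc, ← add_assoc]
            rw [List.foldl_map, hfun, ih, ihl (fun j hj => hl j (by simp [hj]))]
            rcases pvG ability (t + 1) (xs.eraseIdx i) r with _ | v1 <;>
              rcases hrest : pvOlmax (l.map (fun i =>
                (pvG ability (t + 1) (xs.eraseIdx i) r).map
                  (fun v => pvAt ability (xs.getD i 0) t + v))) with _ | w <;>
              simp [pvOmax] <;> rw [add_assoc] <;> try rw [← max_add_add_left, ← max_assoc]
      exact aux (List.range xs.length) (fun i hi => List.mem_range.mp hi) m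

-- generalized form of the inner-fold lemma, walking the permutation as pre ++ suf
theorem pvInner_aux (ability : List (List Int)) (full : List Int) (suf : List Int) :
    ∀ (pre : List Int) (s : Int), full = pre ++ suf →
    (PySem.List.pyRange (pre.length : Int) ((pre.length : Int) + (suf.length : Int)) 1).foldl
        (fun temp task =>
          temp + PySem.List.pyGetD (PySem.List.pyGetD ability (PySem.List.pyGetD full task 0) []) task 0)
        s = s + pvSc ability pre.length suf := by
  induction suf with
  | nil =>
      intro pre s _
      rw [PySem.List.pyRange_one_eq_nil (by simp)]
      simp [pvSc]
  | cons x suf ih =>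
      intro pre s hfull
      rw [PySem.List.pyRange_one_cons (by simp only [List.length_cons]; push_cast; omega), List.foldl_cons]
      have hx : PySem.List.pyGetD full (pre.length : Int) 0 = x := by
        rw [PySem.List.pyGetD_natCast, hfull]
        simp [List.getD]
      rw [hx]
      have hb : (pre.length : Int) + ((x :: suf).length : Int) =
          (((pre ++ [x]).length : Int)) + (suf.length : Int) := by
        simp only [List.length_cons, List.length_append, List.length_nil]; push_cast; omega
      have ha : (pre.length : Int) + 1 = ((pre ++ [x]).length : Int) := by
        simp only [List.length_cons, List.length_append, List.length_nil]; push_cast; omega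
      rw [hb, ha, ih (pre ++ [x]) _ (by simp [hfull])]
      show _ = s + pvSc ability pre.length (x :: suf)
      rw [pvSc]
      have : (pre ++ [x]).length = pre.length + 1 := by simp
      rw [this]
      unfold pvAt
      ring

-- A's inner fold is pvSc 0
theorem pvInner_eq_sc (ability : List (List Int)) (q : List Int) :
    (PySem.List.pyRange 0 (q.length : Int) 1).foldl
        (fun temp task =>
          temp + PySem.List.pyGetD (PySem.List.pyGetD ability (PySem.List.pyGetD q task 0) []) task 0)
        0 = pvSc ability 0 q := by
  have := pvInner_aux ability q q [] 0 rfl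
  simpa using this

-- pvG is none when there are fewer people than tasks
theorem pvG_none (ability : List (List Int)) (r : Nat) (t : Nat) (xs : List Int)
    (h : xs.length < r) : pvG ability t xs r = none := by
  induction r generalizing t xs with
  | zero => omega
  | succ r ih =>
      rw [pvG]
      have : ∀ o ∈ (List.range xs.length).map (fun i =>
          (pvG ability (t + 1) (xs.eraseIdx i) r).map (fun v => pvAt ability (xs.getD i 0) t + v)),
          o = none := by
        intro o ho
        simp only [List.mem_map, List.mem_range] at ho
        obtain ⟨i, hi, rfl⟩ := ho
        rw [ih (t+1) _ (by rw [List.length_eraseIdx_of_lt hi]; omega)]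
        rfl
      generalize (List.range xs.length).map _ = l at this
      induction l with
      | nil => rfl
      | cons o l ihl =>
          rw [pvOlmax_cons, this o (by simp), ihl (fun o ho => this o (by simp [ho]))]
          rfl

-- the available-people list of a used-mask
def pvAvail (numPeople : Nat) (used : Nat) : List Int :=
  (PySem.List.pyRange 0 (numPeople : Nat) 1).filter (fun p => (used >>> p.toNat) &&& 1 == 0)

-- (z >> k) & 1 == 0 is the complement of testBit
theorem pvBit (z k : Nat) : ((z >>> k) &&& 1 == 0) = !z.testBit k := by
  rcases (z.testBit k).eq_false_or_eq_true with h | h <;>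
    simp [h] <;> simpa [Nat.testBit] using h

theorem pvTestBit_one_shift (pn k : Nat) : (1 <<< pn).testBit k = (pn == k) := by
  rw [Nat.shiftLeft_eq, one_mul, Nat.testBit_two_pow]
  exact Eq.symm (Bool.beq_eq_decide_eq pn k)

theorem pvAvail_nodup (numPeople used : Nat) : (pvAvail numPeople used).Nodup :=
  List.Nodup.filter _ (PySem.List.nodup_pyRange_one 0 (numPeople : Int))

-- marking one more person used = filtering that person out of the available list
theorem pvAvail_or (numPeople used : Nat) (p : Int) (hp : p ∈ pvAvail numPeople used) :
    pvAvail numPeople (used ||| 1 <<< p.toNat) =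
      (pvAvail numPeople used).filter (fun q => !(q == p)) := by
  have hp0 : 0 ≤ p := (PySem.List.mem_pyRange_one.mp (List.mem_of_mem_filter hp)).1
  unfold pvAvail
  rw [List.filter_filter]
  apply List.filter_congr
  intro q hq
  have hq0 : 0 ≤ q := (PySem.List.mem_pyRange_one.mp hq).1
  rw [pvBit, pvBit, Nat.testBit_or, pvTestBit_one_shift]
  have hbeq : (p.toNat == q.toNat) = (q == p) := by
    rw [Bool.beq_eq_decide_eq, Bool.beq_eq_decide_eq]
    apply decide_eq_decide.mpr
    omega
  rw [hbeq, Bool.not_or, Bool.and_comm]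

-- removing the i-th available person = filtering that person out
theorem pvAvail_eraseIdx (numPeople used : Nat) (i : Nat)
    (hi : i < (pvAvail numPeople used).length) :
    (pvAvail numPeople used).eraseIdx i =
      (pvAvail numPeople used).filter (fun q => !(q == (pvAvail numPeople used)[i])) := by
  rw [← List.Nodup.erase_getElem (pvAvail_nodup numPeople used) i hi,
    (pvAvail_nodup numPeople used).erase_eq_filter]
  congr 1

theorem pvOlmax_some_cons (l : List Int) : ∀ (a : Int),
    pvOlmax ((a :: l).map some) = some (l.foldl max a) := by
  induction l with
  | nil => intro a; rfl
  | cons b l ih =>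
      intro a
      rw [List.map_cons, pvOlmax_cons]
      show pvOmax (some a) (pvOlmax ((b :: l).map some)) = _
      rw [ih b]
      show some (max a (List.foldl max b l)) = _
      rw [List.foldl_cons, List.foldl_assoc]

theorem pvOlmax_map_some (l : List Int) (hl : l ≠ []) :
    pvOlmax (l.map some) = some (l.max?.getD 0) := by
  obtain ⟨a, l, rfl⟩ := List.exists_cons_of_ne_nil hl
  rw [pvOlmax_some_cons, List.max?_cons']
  rfl

-- B-side: bestGo computes pvG on the available list
theorem pvBestGo_eq_G (ability : List (List Int)) (numPeople numTasks : Nat) (r : Nat) :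
    ∀ (t used : Nat), t + r = numTasks → r ≤ (pvAvail numPeople used).length →
    pvG ability t (pvAvail numPeople used) r = some (bestGo ability numPeople numTasks t used) := by
  induction r with
  | zero =>
      intro t used ht _
      rw [pvG, bestGo, if_pos (by omega)]
  | succ r ih =>
      intro t used ht hlen
      rw [pvG, bestGo, if_neg (by omega)]
      have hbranch : ∀ i, (hi : i < (pvAvail numPeople used).length) →
          (pvG ability (t + 1) ((pvAvail numPeople used).eraseIdx i) r).map
              (fun v => pvAt ability ((pvAvail numPeople used).getD i 0) t + v) =
            some (pvAt ability (pvAvail numPeople used)[i] t +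
              bestGo ability numPeople numTasks (t + 1)
                (used ||| 1 <<< ((pvAvail numPeople used)[i]).toNat)) := by
        intro i hi
        have heq : (pvAvail numPeople used).eraseIdx i =
            pvAvail numPeople (used ||| 1 <<< ((pvAvail numPeople used)[i]).toNat) := by
          rw [pvAvail_eraseIdx numPeople used i hi,
            pvAvail_or numPeople used _ (List.getElem_mem hi)]
        have hlen' : r ≤ (pvAvail numPeople
            (used ||| 1 <<< ((pvAvail numPeople used)[i]).toNat)).length := by
          rw [← heq, List.length_eraseIdx_of_lt hi]; omega
        rw [heq, ih (t + 1) _ (by omega) hlen',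
          List.getD_eq_getElem (pvAvail numPeople used) 0 hi]
        rfl
      have hmap : (List.range (pvAvail numPeople used).length).map (fun i =>
            (pvG ability (t + 1) ((pvAvail numPeople used).eraseIdx i) r).map
              (fun v => pvAt ability ((pvAvail numPeople used).getD i 0) t + v)) =
          ((pvAvail numPeople used).map (fun p =>
            PySem.List.pyGetD (PySem.List.pyGetD ability p []) (t : Int) 0 +
              bestGo ability numPeople numTasks (t + 1) (used ||| 1 <<< p.toNat))).map some := by
        apply List.ext_getElem (by simp)
        intro k h1 h2
        simp only [List.getElem_map, List.getElem_range]
        rw [hbranch k (by simpa using h1)]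
        rfl
      rw [hmap, pvOlmax_map_some _ (by
        intro hnil
        have hlen0 : (pvAvail numPeople used).length = 0 := by
          simpa using congrArg List.length hnil
        omega)]
      rfl

-- the two ports agree (the permutation fold equals the DP through pvG)
theorem pvSolution_eq (ability : List (List Int)) :
    solution ability = solution_alt ability := by
  unfold solution solution_alt
  set P := ability.length with hP
  set T := (PySem.List.pyGetD ability 0 []).length with hT
  have hlenR : (PySem.List.pyRange 0 (P : Int) 1).length = P := by
    rw [PySem.List.length_pyRange_one]; omega
  have hfold : (PySem.List.permutations (PySem.List.pyRange 0 (P : Int) 1) T).foldl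
      (fun maxScore perm =>
        max maxScore
          ((PySem.List.pyRange 0 (T : Int) 1).foldl
            (fun temp task =>
              temp + PySem.List.pyGetD (PySem.List.pyGetD ability (PySem.List.pyGetD perm task 0) []) task 0)
            0))
      0 =
      match pvG ability 0 (PySem.List.pyRange 0 (P : Int) 1) T with
      | none => 0
      | some v => max 0 ((0 : Int) + v) := by
    rw [PySem.List.foldl_congr_mem _ _
      (fun ms q => max ms ((0 : Int) + pvSc ability 0 q)) 0 ?_]
    · exact pvFold_perms ability T (PySem.List.pyRange 0 (P : Int) 1) 0 0 0
    · intro acc q hq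
      have hlq : q.length = T := pvLen_mem_permutations T _ q hq
      rw [← hlq, pvInner_eq_sc ability q]
      show _ = max acc ((0 : Int) + pvSc ability 0 q)
      rw [zero_add]
  rw [hfold]
  by_cases hPT : P < T
  · rw [if_pos hPT, pvG_none ability T 0 _ (by omega)]
  · rw [if_neg hPT]
    have h0 : pvAvail P 0 = PySem.List.pyRange 0 (P : Int) 1 := by
      unfold pvAvail
      simp
    have hbest := pvBestGo_eq_G ability P T T 0 0 (by omega) (by rw [h0, hlenR]; omega)
    rw [h0] at hbest
    rw [hbest]
    show max 0 ((0 : Int) + bestGo ability P T 0 0) = _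
    rw [zero_add]

-- ===== VERDICT (by name: the statement is the Claim_ definition above) =====
theorem solution_spec : Claim_equal_solution := by
  intro ability _ _
  exact pvSolution_eq ability
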